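-- pv_equiv track=rewrite | github.com/JanekKwadrat/szkopul_itp | olimpiada_informatyczna/pisarze/pre.py | fetch_koncowki
-- ===== SOURCE A (Python) =====
-- def fetch_koncowki(book: str):
--     words = book.split()
--     words = [''.join(filter(str.isalnum, s)) for s in words]
--     words = [s[-3:] for s in words if len(s) >= 3]
--     total = len(words)
--     freqs = dict()
--     for s in words:
--         if s in freqs: freqs[s] += 1
--         else: freqs[s] = 1
--     for s in freqs:
--         freqs[s] =  freqs[s] * 1000000 // total
--     return freqs
-- ===== SOURCE B (Python) =====
-- def fetch_koncowki(book: str):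
--     suffixes = []
--     for w in book.split():
--         cleaned = ''.join(c for c in w if c.isalnum())
--         if len(cleaned) >= 3:
--             suffixes.append(cleaned[-3:])
--     total = len(suffixes)
--     # count by sorting: equal suffixes become adjacent runs; scan run by run
--     run = sorted(suffixes)
--     counts = {}
--     while run:
--         k = 1
--         while k < len(run) and run[k] == run[0]:
--             k += 1
--         counts[run[0]] = k * 1000000 // total
--         run = run[k:]
--     # emit in first-occurrence order, as dict insertion order does
--     seen = set()
--     out = {}
--     for s in suffixes:
--         if s not in seen:
--             seen.add(s)
--             out[s] = counts[s]
--     return out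
-- ===== Notes on version B (the rewrite author's own statement) =====
-- stated objective: alternative
-- what changed: Replaces A's hash-style incremental dict counting plus a second rescaling pass by sort-then-run-length-scan: the suffix list is sorted, equal suffixes are counted as adjacent runs in one scan that scales each run length directly, and a final pass over the original suffix order rebuilds the dict in A's first-occurrence insertion order.
import Mathlib
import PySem

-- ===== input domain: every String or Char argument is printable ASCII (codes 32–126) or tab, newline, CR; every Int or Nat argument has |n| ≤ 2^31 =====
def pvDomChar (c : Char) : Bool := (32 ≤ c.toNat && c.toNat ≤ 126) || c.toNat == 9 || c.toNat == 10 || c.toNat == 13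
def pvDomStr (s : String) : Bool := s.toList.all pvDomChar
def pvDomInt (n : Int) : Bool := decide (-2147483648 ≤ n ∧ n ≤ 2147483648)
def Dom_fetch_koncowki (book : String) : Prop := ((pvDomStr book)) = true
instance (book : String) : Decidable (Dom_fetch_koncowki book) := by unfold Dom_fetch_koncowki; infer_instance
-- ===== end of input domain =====

-- B replaces A's incremental dict-counting + rescaling passes by sort-then-run-length-scan
-- (equal suffixes counted as adjacent runs of the sorted list), re-emitted in first-occurrence order.

-- ===== PORT A =====
def fetch_koncowki (book : String) : List (String × Int) :=
  let words : List String := PySem.Str.split₀ book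
  let words := words.map (fun s => String.ofList (s.toList.filter PySem.Chars.isalnum))
  let words := (words.filter (fun s => decide (3 ≤ PySem.Str.len s))).map
      (fun s => String.ofList (PySem.List.slice s.toList (some (-3))))
  let total : Int := (words.length : Int)
  let freqs : PySem.Dict String Int :=
    words.foldl
      (fun d s => if d.contains s then d.insert s (d.getD s 0 + 1) else d.insert s 1)
      PySem.Dict.empty
  let freqs := freqs.keys.foldl
      (fun d s => d.insert s (PySem.Int.floordiv (d.getD s 0 * 1000000) total)) freqs
  freqs.items

-- ===== PORT B =====
-- Source B's 'while run:' loop: the inner 'while' computes k = 1 + length of the leading run of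
-- run[0] in run[1:] (exactly 1 + takeWhile-length), then 'run = run[k:]' (k ≤ len(run), so the
-- slice is exactly List.drop k).
def pvRunScan (total : Int) : List String → PySem.Dict String Int → PySem.Dict String Int
  | [], counts => counts
  | s :: rest, counts =>
      let k : Nat := 1 + (rest.takeWhile (fun t => t == s)).length
      pvRunScan total ((s :: rest).drop k)
        (counts.insert s (PySem.Int.floordiv ((k : Int) * 1000000) total))
  termination_by l => l.length
  decreasing_by simp

def fetch_koncowki_alt (book : String) : List (String × Int) :=
  let suffixes : List String := (PySem.Str.split₀ book).foldl
    (fun acc w =>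
      let cleaned := w.toList.filter PySem.Chars.isalnum
      if 3 ≤ cleaned.length then acc ++ [String.ofList (PySem.List.slice cleaned (some (-3)))]
      else acc) []
  let total : Int := (suffixes.length : Int)
  let counts : PySem.Dict String Int :=
    pvRunScan total (PySem.List.sorted suffixes (fun x => x) false) PySem.Dict.empty
  -- 'out[s] = counts[s]': s is always a key of counts (it occurs in the sorted list), so the
  -- lookup is counts.getD s 0 (exact here; Python would raise only on a missing key)
  let out : PySem.Set String × PySem.Dict String Int := suffixes.foldl
    (fun st s =>
      if PySem.Set.contains st.1 s then st
      else (PySem.Set.add st.1 s, st.2.insert s (counts.getD s 0)))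
    (PySem.Set.ofList [], PySem.Dict.empty)
  out.2.items

-- ===== PRECONDITION & SPEC =====
def Spec_fetch_koncowki (book : String) (out : List (String × Int)) : Prop := out = fetch_koncowki_alt book
instance (book : String) (out : List (String × Int)) : Decidable (Spec_fetch_koncowki book out) := by unfold Spec_fetch_koncowki; infer_instance

-- ===== CLAIM (what is proved, stated in full; the proofs are below) =====
def Claim_equal_fetch_koncowki : Prop := ∀ (book : String), Dom_fetch_koncowki book → Spec_fetch_koncowki book (fetch_koncowki book)

-- ===== LEMMAS AND PROOFS =====

-- A's 'if s in freqs: freqs[s] += 1 else: freqs[s] = 1' step is always 'freqs[s] = freqs.get(s,0) + 1'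
lemma count_step (d : PySem.Dict String Int) (s : String) :
    (if d.contains s then d.insert s (d.getD s 0 + 1) else d.insert s 1)
      = d.insert s (d.getD s 0 + 1) := by
  by_cases h : d.contains s = true
  · simp [h]
  · have hn : d.get? s = none := (PySem.Dict.get?_eq_none_iff_contains d s).2 (by simpa using h)
    simp [h, PySem.Dict.getD, hn]

-- value at k after folding 'd[s] = g(s, d.get(s,0))' over a duplicate-free key list
lemma getD_scale_foldl (g : String → Int → Int) :
    ∀ (ks : List String) (d : PySem.Dict String Int), ks.Nodup → ∀ k : String,
      (ks.foldl (fun d s => d.insert s (g s (d.getD s 0))) d).getD k 0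
        = if k ∈ ks then g k (d.getD k 0) else d.getD k 0 := by
  intro ks
  induction ks with
  | nil => intro d _ k; simp
  | cons a ks ih =>
    intro d hnd k
    have hna : a ∉ ks := (List.nodup_cons.1 hnd).1
    have h := ih (d.insert a (g a (d.getD a 0))) (List.nodup_cons.1 hnd).2 k
    by_cases hk : k ∈ ks
    · have hka : k ≠ a := fun e => hna (e ▸ hk)
      rw [List.foldl_cons, h, if_pos hk, PySem.Dict.getD_insert, if_neg hka, if_pos (List.mem_cons_of_mem a hk)]
    · by_cases hke : k = a
      · subst hke
        simp [List.foldl_cons, h, hk]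
      · simp [List.foldl_cons, h, hk, hke, PySem.Dict.getD_insert]

-- the keys-rescaling fold keeps the key list
lemma keys_scale_foldl (g : String → Int → Int) (d : PySem.Dict String Int) :
    (d.keys.foldl (fun d s => d.insert s (g s (d.getD s 0))) d).keys = d.keys := by
  rw [PySem.Dict.keys_foldl_insert, PySem.Set.update_eq_append_filter]
  have h : (PySem.Set.ofList d.keys).filter (fun y => !(PySem.Set.contains d.keys y)) = [] := by
    rw [List.filter_eq_nil_iff]
    intro y hy
    simp
    exact (PySem.Set.mem_ofList _ _).1 hy
  rw [h, List.append_nil]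

-- both programs build the same 3-char suffix list
lemma suffixes_eq (ws : List String) :
    (ws.foldl
      (fun acc w =>
        let cleaned := w.toList.filter PySem.Chars.isalnum
        if 3 ≤ cleaned.length then acc ++ [String.ofList (PySem.List.slice cleaned (some (-3)))]
        else acc) ([] : List String))
      = ((ws.map (fun s => String.ofList (s.toList.filter PySem.Chars.isalnum))).filter
            (fun s => decide (3 ≤ PySem.Str.len s))).map
          (fun s => String.ofList (PySem.List.slice s.toList (some (-3)))) := by
  rw [PySem.List.foldl_append_ite
      (fun w => 3 ≤ (w.toList.filter PySem.Chars.isalnum).length)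
      (fun w => String.ofList (PySem.List.slice (w.toList.filter PySem.Chars.isalnum) (some (-3)))) ws []]
  rw [List.filter_map, List.map_map, List.nil_append]
  have hq : ∀ w : String,
      ((fun s => decide (3 ≤ PySem.Str.len s)) ∘
        (fun s => String.ofList (s.toList.filter PySem.Chars.isalnum))) w
        = decide (3 ≤ (w.toList.filter PySem.Chars.isalnum).length) := by
    intro w
    simp
  rw [List.filter_congr (fun w _ => hq w)]
  apply List.map_congr_left
  intro w _
  simp

-- A's counting + rescaling over any suffix list S yields the dedup-map normal form
lemma result_eq (S : List String) :
    ((S.foldl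
        (fun d s => if d.contains s then d.insert s (d.getD s 0 + 1) else d.insert s 1)
        (PySem.Dict.empty : PySem.Dict String Int)).keys.foldl
      (fun d s => d.insert s (PySem.Int.floordiv (d.getD s 0 * 1000000) (S.length : Int)))
      (S.foldl
        (fun d s => if d.contains s then d.insert s (d.getD s 0 + 1) else d.insert s 1)
        (PySem.Dict.empty : PySem.Dict String Int))).items
    = (PySem.List.dedup S).map
        (fun s => (s, PySem.Int.floordiv ((S.count s : Int) * 1000000) (S.length : Int))) := by
  have hc : S.foldl
      (fun d s => if d.contains s then d.insert s (d.getD s 0 + 1) else d.insert s 1)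
      (PySem.Dict.empty : PySem.Dict String Int) = PySem.Dict.counter S := by
    simp only [count_step]
    exact PySem.Dict.foldl_insert_getD_add_one_eq_counter S
  simp only [hc]
  have hkeys := keys_scale_foldl (fun _ v => PySem.Int.floordiv (v * 1000000) (S.length : Int))
      (PySem.Dict.counter S)
  have hnd : ((PySem.Dict.counter S).keys.foldl
      (fun d s => d.insert s (PySem.Int.floordiv (d.getD s 0 * 1000000) (S.length : Int)))
      (PySem.Dict.counter S)).keys.Nodup := by
    rw [hkeys]; exact PySem.Dict.nodup_keys_counter S
  rw [PySem.Dict.items_eq_map_keys _ hnd 0, hkeys, PySem.Dict.keys_counter,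
      PySem.List.dedup_eq_ofList]
  apply List.map_congr_left
  intro k hk
  have hmem : k ∈ (PySem.Dict.counter S).keys := by
    rw [PySem.Dict.keys_counter]; exact hk
  have h := getD_scale_foldl (fun _ v => PySem.Int.floordiv (v * 1000000) (S.length : Int))
      (PySem.Dict.counter S).keys (PySem.Dict.counter S) (PySem.Dict.nodup_keys_counter S) k
  rw [if_pos hmem] at h
  rw [PySem.Dict.keys_counter] at h
  rw [h, PySem.Dict.getD_counter]

-- lookup after the run scan: on a ≤-sorted list every run is contiguous, so the inserted
-- value at s is exactly count(s) scaled
lemma runScan_getD (t : Int) (L : List String) (d : PySem.Dict String Int)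
    (hp : L.Pairwise (· ≤ ·)) (s : String) :
    (pvRunScan t L d).getD s 0
      = if s ∈ L then PySem.Int.floordiv ((L.count s : Int) * 1000000) t else d.getD s 0 := by
  induction L, d using pvRunScan.induct (total := t) with
  | case1 d => simp [pvRunScan]
  | case2 s0 rest counts k ih =>
    -- abbreviations
    set tw := rest.takeWhile (fun x => x == s0) with htw
    set dw := rest.dropWhile (fun x => x == s0) with hdwdef
    have hsplit : tw ++ dw = rest := List.takeWhile_append_dropWhile
    have hdrop : List.drop k (s0 :: rest) = dw := by
      show List.drop (1 + tw.length) (s0 :: rest) = dw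
      rw [Nat.add_comm, List.drop_succ_cons, ← hsplit, List.drop_left]
    -- every element of tw is s0
    have htww : ∀ x ∈ tw, x = s0 := by
      intro x hx
      have := List.mem_takeWhile_imp hx
      simpa using this
    -- pairwise facts
    have hprest : rest.Pairwise (· ≤ ·) := hp.of_cons
    have hple : ∀ x ∈ rest, s0 ≤ x := fun x hx => List.rel_of_pairwise_cons hp hx
    have hpdw : dw.Pairwise (· ≤ ·) := hprest.sublist (List.dropWhile_sublist _)
    -- s0 not in dw
    have hs0dw : s0 ∉ dw := by
      intro hmem
      have hne : dw ≠ [] := List.ne_nil_of_mem hmem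
      obtain ⟨e, tl, hdw⟩ := List.exists_cons_of_ne_nil hne
      have hne' : List.dropWhile (fun x => x == s0) rest ≠ [] := by
        rw [← hdwdef, hdw]; simp
      have hh := List.head_dropWhile_not (fun x => x == s0) hne'
      have hlist : List.dropWhile (fun x => x == s0) rest = e :: tl := by rw [← hdwdef, hdw]
      simp only [hlist, List.head_cons] at hh
      have hens : e ≠ s0 := by simpa using hh
      have hedw : e ∈ dw := by rw [hdw]; exact List.mem_cons_self
      have hse : s0 ≤ e := hple e ((List.dropWhile_sublist _).mem hedw)
      have hpdw' : (e :: tl).Pairwise (· ≤ ·) := hdw ▸ hpdw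
      rcases List.mem_cons.mp (hdw ▸ hmem : s0 ∈ e :: tl) with h1 | h2
      · exact hens h1.symm
      · exact hens (le_antisymm (List.rel_of_pairwise_cons hpdw' h2) hse)
    -- counts
    have hcount0 : (s0 :: rest).count s0 = k := by
      rw [← hsplit]
      show ((s0 :: (tw ++ dw)).count s0) = k
      rw [List.count_cons_self, List.count_append]
      have h1 : tw.count s0 = tw.length := by
        rw [List.count_eq_length]
        intro x hx; exact ((htww x hx) ▸ rfl)
      have h2 : dw.count s0 = 0 := List.count_eq_zero.2 hs0dw
      rw [h1, h2]
      rw [htw] at *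
      omega
    rw [pvRunScan]
    show (pvRunScan t (List.drop k (s0 :: rest))
        (counts.insert s0 (PySem.Int.floordiv ((k : Int) * 1000000) t))).getD s 0
      = if s ∈ s0 :: rest then PySem.Int.floordiv ((List.count s (s0 :: rest) : Int) * 1000000) t
        else counts.getD s 0
    rw [hdrop] at ih
    rw [hdrop, ih hpdw]
    by_cases hss : s = s0
    · subst hss
      rw [if_neg hs0dw, if_pos List.mem_cons_self, PySem.Dict.getD_insert_self, hcount0]
    · have hstw : s ∉ tw := fun hx => hss (htww s hx)
      have hmemiff : s ∈ s0 :: rest ↔ s ∈ dw := by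
        rw [← hsplit]
        constructor
        · intro h
          rcases List.mem_cons.mp h with h | h
          · exact absurd h hss
          · rcases List.mem_append.mp h with h | h
            · exact absurd (htww s h) hss
            · exact h
        · intro h
          exact List.mem_cons_of_mem _ (List.mem_append.mpr (Or.inr h))
      have hcnt : (s0 :: rest).count s = dw.count s := by
        rw [← hsplit, List.count_cons_of_ne (Ne.symm hss), List.count_append]
        have h0 : tw.count s = 0 := List.count_eq_zero.2 hstw
        rw [h0]
        omega
      by_cases hdm : s ∈ dw
      · rw [if_pos hdm, if_pos (hmemiff.2 hdm), hcnt]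
      · rw [if_neg hdm, if_neg (fun h => hdm (hmemiff.1 h))]
        simp [PySem.Dict.getD_insert, hss]

-- the first-occurrence keys a 'seen'-guarded pass appends
def pvNew (seen : List String) : List String → List String
  | [] => []
  | s :: xs => if PySem.Set.contains seen s then pvNew seen xs
               else s :: pvNew (PySem.Set.add seen s) xs

lemma update_eq_append_pvNew :
    ∀ (xs seen : List String), PySem.Set.update seen xs = seen ++ pvNew seen xs := by
  intro xs
  induction xs with
  | nil => intro seen; simp [pvNew, PySem.Set.update]
  | cons s xs ih =>
    intro seen
    simp only [PySem.Set.update, List.foldl_cons, pvNew] at *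
    by_cases h : PySem.Set.contains seen s = true
    · rw [if_pos h]
      have ha : PySem.Set.add seen s = seen := by
        simp [PySem.Set.add]
        exact (by simpa using h : s ∈ seen)
      rw [ha, ih]
    · rw [if_neg h]
      have ha : PySem.Set.add seen s = seen ++ [s] := by
        simp [PySem.Set.add]
        exact fun hc => absurd (by simpa using hc) (by simpa using h)
      rw [ha, ih, List.append_assoc]
      rfl

lemma contains_add (seen : List String) (s t : String) :
  PySem.Set.contains (PySem.Set.add seen s) t = (t == s || PySem.Set.contains seen t) := by
  by_cases hm : s ∈ seen <;> by_cases ht : t = s <;>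
    simp [PySem.Set.add, PySem.Set.contains, hm, ht]

lemma fold_out (g : String → Int) :
    ∀ (xs : List String) (seen : List String) (out : PySem.Dict String Int),
      (∀ s, out.contains s = PySem.Set.contains seen s) →
      (xs.foldl
        (fun st s =>
          if PySem.Set.contains st.1 s then st
          else (PySem.Set.add st.1 s, st.2.insert s (g s)))
        ((seen : PySem.Set String), out)).2.items
      = out.items ++ (pvNew seen xs).map (fun s => (s, g s)) := by
  intro xs
  induction xs with
  | nil => intro seen out h; simp [pvNew]
  | cons s xs ih =>
    intro seen out h
    simp only [List.foldl_cons, pvNew]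
    by_cases hc : PySem.Set.contains seen s = true
    · rw [if_pos hc, if_pos hc, ih seen out h]
    · rw [if_neg hc, if_neg hc]
      have hnew : ∀ t, (out.insert s (g s)).contains t = PySem.Set.contains (PySem.Set.add seen s) t := by
        intro t
        rw [PySem.Dict.contains_insert, h t, ← contains_add]
      rw [ih (PySem.Set.add seen s) (out.insert s (g s)) hnew]
      have hic : out.contains s = false := by
        rw [h s]; simpa using hc
      rw [PySem.Dict.items_insert_of_not_contains (h := hic)]
      simp

-- B reduces to the same dedup-map normal form
lemma alt_eq (S : List String) :
    (S.foldl
      (fun st s =>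
        if PySem.Set.contains st.1 s then st
        else (PySem.Set.add st.1 s,
              st.2.insert s
                ((pvRunScan (S.length : Int) (PySem.List.sorted S (fun x => x) false)
                    PySem.Dict.empty).getD s 0)))
      (PySem.Set.ofList [], PySem.Dict.empty)).2.items
    = (PySem.List.dedup S).map
        (fun s => (s, PySem.Int.floordiv ((S.count s : Int) * 1000000) (S.length : Int))) := by
  have h0 : ∀ s : String, (PySem.Dict.empty : PySem.Dict String Int).contains s
      = PySem.Set.contains ([] : List String) s := by
    intro s; simp [PySem.Set.contains]
  have hf := fold_out
      (fun s => (pvRunScan (S.length : Int) (PySem.List.sorted S (fun x => x) false)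
          PySem.Dict.empty).getD s 0) S [] PySem.Dict.empty h0
  rw [show (PySem.Set.ofList [] : PySem.Set String) = ([] : List String) from rfl]
  rw [hf]
  have hnew : pvNew [] S = PySem.List.dedup S := by
    have := update_eq_append_pvNew S []
    simpa [PySem.Set.update_nil_left, PySem.List.dedup_eq_ofList] using this.symm
  rw [hnew]
  simp only [show (PySem.Dict.empty : PySem.Dict String Int).items = [] from rfl, List.nil_append]
  apply List.map_congr_left
  intro s hs
  have hsS : s ∈ S := (PySem.List.mem_dedup _ _).1 hs
  have hp : (PySem.List.sorted S (fun x => x) false).Pairwise (· ≤ ·) :=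
    PySem.List.sorted_pairwise S (fun x => x)
  have hr := runScan_getD (S.length : Int) (PySem.List.sorted S (fun x => x) false)
      PySem.Dict.empty hp s
  have hperm : (PySem.List.sorted S (fun x => x) false).Perm S := PySem.List.sorted_perm S _ _
  have hmem : s ∈ PySem.List.sorted S (fun x => x) false := hperm.mem_iff.2 hsS
  have hcnt : (PySem.List.sorted S (fun x => x) false).count s = S.count s := hperm.count_eq s
  rw [hr, if_pos hmem, hcnt]

-- ===== VERDICT (by name: the statement is the Claim_ definition above) =====
theorem fetch_koncowki_spec : Claim_equal_fetch_koncowki := by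
  intro book _
  unfold Spec_fetch_koncowki
  simp only [fetch_koncowki, fetch_koncowki_alt]
  rw [suffixes_eq, result_eq, alt_eq]
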